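-- pv_equiv track=rewrite | github.com/PolyethereaLabs/CompanionBridge | simple_processor.py | _extract_self_awareness
-- ===== SOURCE A (Python) =====
-- def _extract_self_awareness(traits_section, dynamics_section):
--     """Extract operational self-awareness"""
--     awareness_items = []
--
--     # Look for AI awareness patterns
--     content = (traits_section + " " + dynamics_section).lower()
--
--     if 'i understand' in content:
--         awareness_items.append("I understand my role and capabilities")
--     if any(phrase in content for phrase in ['i can', 'i help', 'i support']):
--         awareness_items.append("I can provide meaningful support and engagement")
--     if 'learn' in content or 'grow' in content:
--         awareness_items.append("I grow through our interactions")
--     if 'boundaries' in content or 'limits' in content: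
--         awareness_items.append("I respect boundaries while being authentic")
--
--     return " and ".join(awareness_items) if awareness_items else "I understand my nature as an AI while building genuine connection"
-- ===== SOURCE B (Python) =====
-- _MESSAGES = [
--     "I understand my role and capabilities",
--     "I can provide meaningful support and engagement",
--     "I grow through our interactions",
--     "I respect boundaries while being authentic",
-- ]
--
-- _FALLBACK = "I understand my nature as an AI while building genuine connection"
--
-- # All 16 possible outputs, precomputed once: entry m joins the messages whose
-- # bit is set in m (empty mask -> fallback).
-- _TABLE = [
--     " and ".join(msg for i, msg in enumerate(_MESSAGES) if (m >> i) & 1) or _FALLBACK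
--     for m in range(16)
-- ]
--
-- def _extract_self_awareness(traits_section, dynamics_section):
--     content = (traits_section + " " + dynamics_section).lower()
--     mask = (int('i understand' in content)
--             | (int('i can' in content or 'i help' in content or 'i support' in content) << 1)
--             | (int('learn' in content or 'grow' in content) << 2)
--             | (int('boundaries' in content or 'limits' in content) << 3))
--     return _TABLE[mask]
-- ===== Notes on version B (the rewrite author's own statement) =====
-- stated objective: alternative
-- what changed: B computes a 4-bit match bitmask from the substring checks and returns a 16-entry output table precomputed once at module load, instead of conditionally appending messages to a list and joining them per call.
import Mathlib
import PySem

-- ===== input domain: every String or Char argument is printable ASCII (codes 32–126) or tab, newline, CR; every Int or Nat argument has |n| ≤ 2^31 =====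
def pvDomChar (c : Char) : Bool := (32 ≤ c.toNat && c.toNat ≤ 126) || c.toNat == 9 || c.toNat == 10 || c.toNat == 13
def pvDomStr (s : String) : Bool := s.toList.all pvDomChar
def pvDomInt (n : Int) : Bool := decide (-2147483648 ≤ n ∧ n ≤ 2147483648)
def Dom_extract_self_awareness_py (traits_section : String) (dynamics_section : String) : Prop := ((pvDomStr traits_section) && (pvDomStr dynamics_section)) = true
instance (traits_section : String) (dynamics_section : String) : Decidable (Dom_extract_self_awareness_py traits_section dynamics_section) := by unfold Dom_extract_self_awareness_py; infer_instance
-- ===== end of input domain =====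

-- B replaces A's conditional list-append-and-join with a 4-bit match bitmask indexing a
-- 16-entry output table precomputed once at module load; same cost, different structure.

-- ===== PORT A =====
def extract_self_awareness_py (traits_section : String) (dynamics_section : String) : String :=
  let content : List Char :=
    PySem.Chars.lower (traits_section.toList ++ " ".toList ++ dynamics_section.toList)
  let items0 : List String := []
  let items1 := if PySem.Chars.isIn "i understand".toList content then
      items0 ++ ["I understand my role and capabilities"] else items0
  let items2 := if (["i can", "i help", "i support"].any
      (fun phrase => PySem.Chars.isIn phrase.toList content)) then
      items1 ++ ["I can provide meaningful support and engagement"] else items1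
  let items3 := if (PySem.Chars.isIn "learn".toList content || PySem.Chars.isIn "grow".toList content) then
      items2 ++ ["I grow through our interactions"] else items2
  let items4 := if (PySem.Chars.isIn "boundaries".toList content || PySem.Chars.isIn "limits".toList content) then
      items3 ++ ["I respect boundaries while being authentic"] else items3
  if items4 ≠ [] then PySem.Str.join " and " items4
  else "I understand my nature as an AI while building genuine connection"

-- ===== PORT B =====
def pvMessages : List String :=
  [ "I understand my role and capabilities",
    "I can provide meaningful support and engagement",
    "I grow through our interactions",
    "I respect boundaries while being authentic" ]

def pvFallback : String := "I understand my nature as an AI while building genuine connection"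

-- _TABLE: the comprehension over range(16); masks and bit indices are nonnegative, so Nat
-- bit arithmetic is exact here.
def pvTable : List String :=
  (List.range 16).map (fun m =>
    let s := PySem.Str.join " and "
      (((PySem.List.enumerate pvMessages).filter
          (fun p => (m >>> p.1.toNat) &&& 1 == 1)).map (·.2))
    if s ≠ "" then s else pvFallback)

def extract_self_awareness_py_alt (traits_section : String) (dynamics_section : String) : String :=
  let content : List Char :=
    PySem.Chars.lower (traits_section.toList ++ " ".toList ++ dynamics_section.toList)
  let mask : Nat :=
    (if PySem.Chars.isIn "i understand".toList content then 1 else 0)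
    ||| ((if PySem.Chars.isIn "i can".toList content
            || PySem.Chars.isIn "i help".toList content
            || PySem.Chars.isIn "i support".toList content then 1 else 0) <<< 1)
    ||| ((if PySem.Chars.isIn "learn".toList content
            || PySem.Chars.isIn "grow".toList content then 1 else 0) <<< 2)
    ||| ((if PySem.Chars.isIn "boundaries".toList content
            || PySem.Chars.isIn "limits".toList content then 1 else 0) <<< 3)
  -- _TABLE[mask]: mask < 16 always, so the plain in-range lookup is exact
  pvTable.getD mask ""

-- ===== PRECONDITION & SPEC =====
def Spec_extract_self_awareness_py (traits_section : String) (dynamics_section : String) (out : String) : Prop := out = extract_self_awareness_py_alt traits_section dynamics_section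
instance (traits_section : String) (dynamics_section : String) (out : String) : Decidable (Spec_extract_self_awareness_py traits_section dynamics_section out) := by unfold Spec_extract_self_awareness_py; infer_instance

-- ===== CLAIM (what is proved, stated in full; the proofs are below) =====
def Claim_equal_extract_self_awareness_py : Prop := ∀ (traits_section : String) (dynamics_section : String), Dom_extract_self_awareness_py traits_section dynamics_section → Spec_extract_self_awareness_py traits_section dynamics_section (extract_self_awareness_py traits_section dynamics_section)

-- ===== LEMMAS AND PROOFS =====

-- ===== VERDICT (by name: the statement is the Claim_ definition above) =====
set_option maxHeartbeats 2000000 in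
theorem extract_self_awareness_py_spec : Claim_equal_extract_self_awareness_py := by
  intro t d _
  unfold Spec_extract_self_awareness_py extract_self_awareness_py extract_self_awareness_py_alt
  cases h1 : PySem.Chars.isIn "i understand".toList (PySem.Chars.lower (t.toList ++ " ".toList ++ d.toList)) <;>
  cases h2 : PySem.Chars.isIn "i can".toList (PySem.Chars.lower (t.toList ++ " ".toList ++ d.toList)) <;>
  cases h3 : PySem.Chars.isIn "i help".toList (PySem.Chars.lower (t.toList ++ " ".toList ++ d.toList)) <;>
  cases h4 : PySem.Chars.isIn "i support".toList (PySem.Chars.lower (t.toList ++ " ".toList ++ d.toList)) <;>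
  cases h5 : PySem.Chars.isIn "learn".toList (PySem.Chars.lower (t.toList ++ " ".toList ++ d.toList)) <;>
  cases h6 : PySem.Chars.isIn "grow".toList (PySem.Chars.lower (t.toList ++ " ".toList ++ d.toList)) <;>
  cases h7 : PySem.Chars.isIn "boundaries".toList (PySem.Chars.lower (t.toList ++ " ".toList ++ d.toList)) <;>
  cases h8 : PySem.Chars.isIn "limits".toList (PySem.Chars.lower (t.toList ++ " ".toList ++ d.toList)) <;>
  simp only [List.any_cons, List.any_nil, h1, h2, h3, h4, h5, h6, h7, h8,
    Bool.or_false, Bool.or_true, if_true, if_false, ne_eq, reduceCtorEq,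
    not_true_eq_false] <;> rfl
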